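-- pv_equiv track=rewrite | github.com/MooYongArin/grader-python | 07_StrFile/07_StrFile_★★★_Password_Strength.py | letter_sequence
-- ===== SOURCE A (Python) =====
-- def letter_sequence(t):
--     t = t.lower()
--     a_z = "abcdefghijklmnopqrstuvwxyz"
--     for j in range(len(a_z)-3):
--         for i in range(len(t)-3):
--             if t[i:i+4] == a_z[j:j+4] or t[i:i+4] == a_z[j+4:j:-1] or t[i:i+4] == a_z[3::-1] :
--                 return True
--     return False
-- ===== SOURCE B (Python) =====
-- def letter_sequence(t):
--     t = t.lower()
--     asc = 1
--     desc = 1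
--     prev = None
--     for c in t:
--         if prev is not None and 'a' <= prev <= 'z' and 'a' <= c <= 'z':
--             asc = asc + 1 if ord(c) - ord(prev) == 1 else 1
--             desc = desc + 1 if ord(prev) - ord(c) == 1 else 1
--         else:
--             asc = 1
--             desc = 1
--         if asc >= 4 or desc >= 4:
--             return True
--         prev = c
--     return False
-- ===== Notes on version B (the rewrite author's own statement) =====
-- stated objective: simpler
-- what changed: A compares every 4-character window of the lowered string against all 47 alphabet-slice patterns in nested loops; B makes one pass keeping the lengths of the current ascending and descending consecutive-letter runs and returns True when either reaches 4.
import Mathlib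
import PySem

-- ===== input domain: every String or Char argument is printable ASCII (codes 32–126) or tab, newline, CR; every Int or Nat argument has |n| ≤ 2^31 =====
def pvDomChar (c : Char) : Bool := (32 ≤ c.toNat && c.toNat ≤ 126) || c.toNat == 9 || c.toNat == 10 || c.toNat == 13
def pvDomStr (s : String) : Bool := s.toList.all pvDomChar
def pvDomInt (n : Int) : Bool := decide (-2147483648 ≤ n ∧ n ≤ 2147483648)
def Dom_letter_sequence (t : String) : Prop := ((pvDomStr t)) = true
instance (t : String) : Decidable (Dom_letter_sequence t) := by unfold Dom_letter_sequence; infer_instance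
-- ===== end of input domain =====

-- B replaces A's 23×n nested pattern-comparison loops by one pass over the string
-- maintaining the current ascending/descending consecutive-letter run lengths (objective: simpler).

-- ===== PORT A =====
-- a_z = "abcdefghijklmnopqrstuvwxyz" (string ported as its list of characters; slicing and
-- equality of Python strings are ported on the char-list side, which is exact).
def pvAz : List Char := "abcdefghijklmnopqrstuvwxyz".toList

-- the loop body's condition for given j, i (t already lowered to the char list l):
-- t[i:i+4] == a_z[j:j+4] or t[i:i+4] == a_z[j+4:j:-1] or t[i:i+4] == a_z[3::-1]
-- a_z[j+4:j:-1] (0 ≤ j, step -1, start j+4 > stop j) equals reversed a_z[j+1:j+5] in Python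
-- (index-exact incl. the start clamp at j=22); a_z[3::-1] equals reversed a_z[:4].
def pvCondA (l : List Char) (j i : Nat) : Bool :=
  decide (PySem.List.slice l (some (i:Int)) (some ((i:Int)+4)) = PySem.List.slice pvAz (some (j:Int)) (some ((j:Int)+4)))
  || decide (PySem.List.slice l (some (i:Int)) (some ((i:Int)+4)) = (PySem.List.slice pvAz (some ((j:Int)+1)) (some ((j:Int)+5))).reverse)
  || decide (PySem.List.slice l (some (i:Int)) (some ((i:Int)+4)) = (PySem.List.slice pvAz none (some 4)).reverse)

-- nested 'for … return True … return False' = List.any over both ranges.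
-- range(len(a_z)-3) = range 23; range(len(t)-3) is empty when len(t) < 4, matching Nat truncation.
def letter_sequence (t : String) : Bool :=
  let l := (PySem.Str.lower t).toList
  (List.range (pvAz.length - 3)).any fun j =>
    (List.range (l.length - 3)).any fun i => pvCondA l j i

-- ===== PORT B =====
-- 'a' <= x <= 'z' on one-character strings is code-point comparison: 97 ≤ ord x ≤ 122 (exact).
def pvIsL (c : Char) : Bool := decide (97 ≤ c.toNat) && decide (c.toNat ≤ 122)

-- the for-loop with early return: prev : Option Char (None at start), counters asc, desc.
def pvAltLoop : Option Char → Nat → Nat → List Char → Bool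
  | _, _, _, [] => false
  | prev, asc, desc, c :: rest =>
    let ad : Nat × Nat :=
      match prev with
      | some p =>
        if pvIsL p && pvIsL c then
          ((if c.toNat = p.toNat + 1 then asc + 1 else 1),
           (if p.toNat = c.toNat + 1 then desc + 1 else 1))
        else (1, 1)
      | none => (1, 1)
    if 4 ≤ ad.1 || 4 ≤ ad.2 then true else pvAltLoop (some c) ad.1 ad.2 rest

def letter_sequence_alt (t : String) : Bool :=
  pvAltLoop none 1 1 (PySem.Str.lower t).toList

-- ===== PRECONDITION & SPEC =====
def Spec_letter_sequence (t : String) (out : Bool) : Prop := out = letter_sequence_alt t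
instance (t : String) (out : Bool) : Decidable (Spec_letter_sequence t out) := by unfold Spec_letter_sequence; infer_instance

-- ===== CLAIM (what is proved, stated in full; the proofs are below) =====
def Claim_equal_letter_sequence : Prop := ∀ (t : String), Dom_letter_sequence t → Spec_letter_sequence t (letter_sequence t)

-- ===== LEMMAS AND PROOFS =====

-- one step of an ascending / descending consecutive-letter run
def stepA (p c : Char) : Bool := pvIsL p && pvIsL c && decide (c.toNat = p.toNat + 1)
def stepD (p c : Char) : Bool := pvIsL p && pvIsL c && decide (p.toNat = c.toNat + 1)

-- the common specification: some 4-character window of l is an ascending or descending run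
def RunP (l : List Char) : Prop :=
  ∃ i a b c d ys, l.drop i = a :: b :: c :: d :: ys ∧
    ((stepA a b && stepA b c && stepA c d) = true ∨ (stepD a b && stepD b c && stepD c d) = true)

-- f-chain of length n continuing from p into xs
def cont (f : Char → Char → Bool) : Char → List Char → Nat → Bool
  | _, _, 0 => true
  | _, [], _+1 => false
  | p, x :: xs, n+1 => f p x && cont f x xs n

lemma cont_mono (f : Char → Char → Bool) :
    ∀ (n : Nat) (p : Char) (xs : List Char) (m : Nat), cont f p xs n = true → m ≤ n → cont f p xs m = true := by
  intro n
  induction n with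
  | zero => intro p xs m h hm; interval_cases m; cases xs <;> simp [cont]
  | succ k ih =>
    intro p xs m h hm
    cases m with
    | zero => cases xs <;> simp [cont]
    | succ m' =>
      cases xs with
      | nil => simp [cont] at h
      | cons x xs' =>
        simp only [cont, Bool.and_eq_true] at h ⊢
        exact ⟨h.1, ih x xs' m' h.2 (by omega)⟩

lemma cont3_iff (f : Char → Char → Bool) (p : Char) (xs : List Char) :
    cont f p xs 3 = true ↔ ∃ b c d ys, xs = b :: c :: d :: ys ∧ (f p b && f b c && f c d) = true := by
  match xs with
  | [] => simp [cont]
  | [b] => simp [cont]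
  | [b, c] => simp [cont]
  | b :: c :: d :: ys => simp [cont, Bool.and_assoc]

lemma runP_nil : ¬ RunP [] := by
  rintro ⟨i, a, b, c, d, ys, h, -⟩
  simp at h

lemma runP_cons (x : Char) (l : List Char) :
    RunP (x :: l) ↔
      ((∃ b c d ys, l = b :: c :: d :: ys ∧
        ((stepA x b && stepA b c && stepA c d) = true ∨ (stepD x b && stepD b c && stepD c d) = true))
       ∨ RunP l) := by
  constructor
  · rintro ⟨i, a, b, c, d, ys, h, hs⟩
    cases i with
    | zero =>
      simp only [List.drop_zero] at h
      injection h with h1 h2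
      subst h1; subst h2
      exact Or.inl ⟨b, c, d, ys, rfl, hs⟩
    | succ i' =>
      exact Or.inr ⟨i', a, b, c, d, ys, by simpa using h, hs⟩
  · rintro (⟨b, c, d, ys, rfl, hs⟩ | ⟨i, a, b, c, d, ys, h, hs⟩)
    · exact ⟨0, x, b, c, d, ys, rfl, hs⟩
    · exact ⟨i + 1, a, b, c, d, ys, by simpa using h, hs⟩

-- RunP (x :: l) through the chain predicate
lemma runP_cons' (x : Char) (l : List Char) :
    RunP (x :: l) ↔ ((cont stepA x l 3 = true ∨ cont stepD x l 3 = true) ∨ RunP l) := by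
  rw [runP_cons, cont3_iff, cont3_iff]
  constructor
  · rintro (⟨b, c, d, ys, hl, h | h⟩ | hr)
    · exact Or.inl (Or.inl ⟨b, c, d, ys, hl, h⟩)
    · exact Or.inl (Or.inr ⟨b, c, d, ys, hl, h⟩)
    · exact Or.inr hr
  · rintro ((⟨b, c, d, ys, hl, h⟩ | ⟨b, c, d, ys, hl, h⟩) | hr)
    · exact Or.inl ⟨b, c, d, ys, hl, Or.inl h⟩
    · exact Or.inl ⟨b, c, d, ys, hl, Or.inr h⟩
    · exact Or.inr hr

-- existential-run bookkeeping for the loop invariant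
lemma ex_dead_nil (f : Char → Char → Bool) (p : Char) (k : Nat) :
    ¬ ∃ n, 1 ≤ n ∧ 4 ≤ k + n ∧ cont f p [] n = true := by
  rintro ⟨n, h1, -, hc⟩
  cases n with
  | zero => omega
  | succ m => simp [cont] at hc

lemma ex_dead (f : Char → Char → Bool) (p c : Char) (rs : List Char) (k : Nat)
    (hstep : f p c = false) :
    ¬ ∃ n, 1 ≤ n ∧ 4 ≤ k + n ∧ cont f p (c :: rs) n = true := by
  rintro ⟨n, h1, -, hc⟩
  cases n with
  | zero => omega
  | succ m => simp [cont, hstep] at hc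

lemma ex_shift (f : Char → Char → Bool) (p c : Char) (rs : List Char) (k : Nat)
    (hstep : f p c = true) (hk4 : ¬ 4 ≤ k + 1) :
    ((∃ n, 1 ≤ n ∧ 4 ≤ k + n ∧ cont f p (c :: rs) n = true) ↔
     (∃ n, 1 ≤ n ∧ 4 ≤ (k + 1) + n ∧ cont f c rs n = true)) := by
  constructor
  · rintro ⟨n, h1, h4, hc⟩
    cases n with
    | zero => omega
    | succ m =>
      simp only [cont, hstep, Bool.true_and] at hc
      cases m with
      | zero => omega
      | succ m' => exact ⟨m' + 1, by omega, by omega, hc⟩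
  · rintro ⟨n, h1, h4, hc⟩
    exact ⟨n + 1, by omega, by omega, by simp [cont, hstep, hc]⟩

lemma ex_one (f : Char → Char → Bool) (x : Char) (rs : List Char) :
    ((∃ n, 1 ≤ n ∧ 4 ≤ 1 + n ∧ cont f x rs n = true) ↔ cont f x rs 3 = true) := by
  constructor
  · rintro ⟨n, h1, h4, hc⟩
    exact cont_mono f n x rs 3 hc (by omega)
  · intro h
    exact ⟨3, by omega, by omega, h⟩

lemma c3_to_ex (f : Char → Char → Bool) (x : Char) (rs : List Char) (k : Nat) (hk : 1 ≤ k)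
    (h : cont f x rs 3 = true) : ∃ n, 1 ≤ n ∧ 4 ≤ k + n ∧ cont f x rs n = true :=
  ⟨3, by omega, by omega, h⟩

-- ascending / descending patterns of A, evaluated (all by computation on the literal alphabet)
lemma ascPat_eq : ∀ j ∈ List.range 23,
    PySem.List.slice pvAz (some (j:Int)) (some ((j:Int)+4))
      = [Char.ofNat (97+j), Char.ofNat (98+j), Char.ofNat (99+j), Char.ofNat (100+j)] := by decide

lemma descPat_eq : ∀ j ∈ List.range 22,
    (PySem.List.slice pvAz (some ((j:Int)+1)) (some ((j:Int)+5))).reverse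
      = [Char.ofNat (101+j), Char.ofNat (100+j), Char.ofNat (99+j), Char.ofNat (98+j)] := by decide

lemma descPat22_len :
    ((PySem.List.slice pvAz (some ((((22:Nat)):Int)+1)) (some ((((22:Nat)):Int)+5))).reverse).length = 3 := by decide

lemma dcba_eq : (PySem.List.slice pvAz none (some 4)).reverse = ['d','c','b','a'] := by decide

def tripleA : List Char → Bool
  | [a,b,c,d] => stepA a b && stepA b c && stepA c d
  | _ => false
def tripleD : List Char → Bool
  | [a,b,c,d] => stepD a b && stepD b c && stepD c d
  | _ => false

lemma ascPat_good : ∀ j ∈ List.range 23,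
    tripleA (PySem.List.slice pvAz (some (j:Int)) (some ((j:Int)+4))) = true := by decide
lemma descPat_good : ∀ j ∈ List.range 22,
    tripleD ((PySem.List.slice pvAz (some ((j:Int)+1)) (some ((j:Int)+5))).reverse) = true := by decide
lemma dcba_good : tripleD ((PySem.List.slice pvAz none (some 4)).reverse) = true := by decide

-- the crux: A's per-window test over all j equals "window is an asc or desc run"
lemma window_iff (a b c d : Char) :
    (∃ j ∈ List.range 23,
      ([a,b,c,d] = PySem.List.slice pvAz (some (j:Int)) (some ((j:Int)+4))
       ∨ [a,b,c,d] = (PySem.List.slice pvAz (some ((j:Int)+1)) (some ((j:Int)+5))).reverse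
       ∨ [a,b,c,d] = (PySem.List.slice pvAz none (some 4)).reverse))
    ↔ ((stepA a b && stepA b c && stepA c d) = true ∨ (stepD a b && stepD b c && stepD c d) = true) := by
  constructor
  · rintro ⟨j, hj, h | h | h⟩
    · have hg := ascPat_good j hj
      rw [← h] at hg
      exact Or.inl (by simpa [tripleA] using hg)
    · by_cases h22 : j = 22
      · subst h22
        have := congrArg List.length h
        rw [descPat22_len] at this
        simp at this
      · have hj' : j ∈ List.range 22 := by
          simp only [List.mem_range] at hj ⊢; omega
        have hg := descPat_good j hj'
        rw [← h] at hg
        exact Or.inr (by simpa [tripleD] using hg)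
    · have hg := dcba_good
      rw [← h] at hg
      exact Or.inr (by simpa [tripleD] using hg)
  · rintro (h | h)
    · -- ascending run: the pattern at j = a.toNat - 97 matches
      simp only [Bool.and_eq_true, stepA, pvIsL, decide_eq_true_eq] at h
      obtain ⟨⟨⟨⟨⟨ha1, ha2⟩, hb1, hb2⟩, hba⟩, ⟨-, -, hc2⟩, hcb⟩, ⟨-, -, hd2⟩, hdc⟩ := h
      refine ⟨a.toNat - 97, by simp only [List.mem_range]; omega, Or.inl ?_⟩
      rw [ascPat_eq _ (by simp only [List.mem_range]; omega)]
      rw [show 97 + (a.toNat - 97) = a.toNat by omega,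
          show 98 + (a.toNat - 97) = b.toNat by omega,
          show 99 + (a.toNat - 97) = c.toNat by omega,
          show 100 + (a.toNat - 97) = d.toNat by omega,
          Char.ofNat_toNat, Char.ofNat_toNat, Char.ofNat_toNat, Char.ofNat_toNat]
    · -- descending run: either the constant "dcba" pattern or the one at j = d.toNat - 98
      simp only [Bool.and_eq_true, stepD, pvIsL, decide_eq_true_eq] at h
      obtain ⟨⟨⟨⟨⟨ha1, ha2⟩, hb1, hb2⟩, hab⟩, ⟨-, -, hc2⟩, hbc⟩, ⟨-, hd1, -⟩, hcd⟩ := h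
      by_cases h97 : d.toNat = 97
      · refine ⟨0, by simp, Or.inr (Or.inr ?_)⟩
        rw [dcba_eq, show (['d','c','b','a'] : List Char)
              = [Char.ofNat 100, Char.ofNat 99, Char.ofNat 98, Char.ofNat 97] by decide]
        rw [show (100 : Nat) = a.toNat by omega, show (99 : Nat) = b.toNat by omega,
            show (98 : Nat) = c.toNat by omega, show (97 : Nat) = d.toNat by omega,
            Char.ofNat_toNat, Char.ofNat_toNat, Char.ofNat_toNat, Char.ofNat_toNat]
      · refine ⟨d.toNat - 98, by simp only [List.mem_range]; omega, Or.inr (Or.inl ?_)⟩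
        rw [descPat_eq _ (by simp only [List.mem_range]; omega)]
        rw [show 101 + (d.toNat - 98) = a.toNat by omega,
            show 100 + (d.toNat - 98) = b.toNat by omega,
            show 99 + (d.toNat - 98) = c.toNat by omega,
            show 98 + (d.toNat - 98) = d.toNat by omega,
            Char.ofNat_toNat, Char.ofNat_toNat, Char.ofNat_toNat, Char.ofNat_toNat]

lemma exists_four {α : Type} (xs : List α) (h : 4 ≤ xs.length) :
    ∃ a b c d ys, xs = a :: b :: c :: d :: ys := by
  match xs with
  | a :: b :: c :: d :: ys => exact ⟨a, b, c, d, ys, rfl⟩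
  | [] | [_] | [_,_] | [_,_,_] => simp at h

lemma slice_four (l : List Char) (i : Nat) (a b c d : Char) (ys : List Char)
    (hd : l.drop i = a :: b :: c :: d :: ys) :
    PySem.List.slice l (some (i:Int)) (some ((i:Int)+4)) = [a, b, c, d] := by
  have h := PySem.List.slice_natCast_add l i 4
  push_cast at h
  rw [h, hd]
  rfl

-- A-side characterisation
lemma A_iff (l : List Char) :
    (((List.range (pvAz.length - 3)).any fun j =>
      (List.range (l.length - 3)).any fun i => pvCondA l j i) = true) ↔ RunP l := by
  rw [show pvAz.length - 3 = 23 from by decide]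
  simp only [List.any_eq_true, List.mem_range]
  constructor
  · rintro ⟨j, hj, i, hi, hc⟩
    have h4 : 4 ≤ (l.drop i).length := by rw [List.length_drop]; omega
    obtain ⟨a, b, c, d, ys, hd⟩ := exists_four _ h4
    have hs := slice_four l i a b c d ys hd
    simp only [pvCondA, hs, Bool.or_eq_true, decide_eq_true_eq] at hc
    exact ⟨i, a, b, c, d, ys, hd, (window_iff a b c d).mp ⟨j, by simpa using hj, by tauto⟩⟩
  · rintro ⟨i, a, b, c, d, ys, hd, hrun⟩
    obtain ⟨j, hj, hc⟩ := (window_iff a b c d).mpr hrun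
    have hlen : (l.drop i).length = ys.length + 4 := by rw [hd]; rfl
    rw [List.length_drop] at hlen
    refine ⟨j, by simpa using hj, i, by omega, ?_⟩
    simp only [pvCondA, slice_four l i a b c d ys hd, Bool.or_eq_true, decide_eq_true_eq]
    tauto

-- B-side loop invariant
lemma loop_iff : ∀ (rest : List Char) (p : Char) (asc desc : Nat), 1 ≤ asc → 1 ≤ desc →
    (pvAltLoop (some p) asc desc rest = true ↔
      ((∃ n, 1 ≤ n ∧ 4 ≤ asc + n ∧ cont stepA p rest n = true)
       ∨ (∃ n, 1 ≤ n ∧ 4 ≤ desc + n ∧ cont stepD p rest n = true)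
       ∨ RunP rest)) := by
  intro rest
  induction rest with
  | nil =>
    intro p asc desc _ _
    simp only [pvAltLoop, Bool.false_eq_true, false_iff]
    rintro (h | h | hr)
    · exact ex_dead_nil stepA p asc h
    · exact ex_dead_nil stepD p desc h
    · exact runP_nil hr
  | cons c rs ih =>
    intro p asc desc hasc hdesc
    rw [runP_cons' c rs]
    by_cases hL : (pvIsL p && pvIsL c) = true
    · by_cases hA : c.toNat = p.toNat + 1
      · -- ascending step: counters become (asc + 1, 1)
        have hD : ¬ p.toNat = c.toNat + 1 := by omega
        have hsA : stepA p c = true := by simp [stepA, hL, hA]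
        have hsD : stepD p c = false := by simp [stepD, hD]
        by_cases h4 : 4 ≤ asc + 1
        · have hlhs : pvAltLoop (some p) asc desc (c :: rs) = true := by
            simp [pvAltLoop, hL, hA, h4]
          simp only [hlhs, true_iff]
          exact Or.inl ⟨1, le_refl 1, by omega, by simp [cont, hsA]⟩
        · have hlhs : pvAltLoop (some p) asc desc (c :: rs) = pvAltLoop (some c) (asc + 1) 1 rs := by
            simp [pvAltLoop, hL, hA, h4, show ¬ p.toNat = p.toNat + 1 + 1 by omega]
          rw [hlhs, ih c (asc + 1) 1 (by omega) (by omega),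
              ex_shift stepA p c rs asc hsA h4, ex_one stepD c rs]
          have hdead := ex_dead stepD p c rs desc hsD
          have hgrow := c3_to_ex stepA c rs (asc + 1) (by omega)
          constructor
          · rintro (h | h | h)
            · exact Or.inl h
            · exact Or.inr (Or.inr (Or.inl (Or.inr h)))
            · exact Or.inr (Or.inr (Or.inr h))
          · rintro (h | h | (h | h) | h)
            · exact Or.inl h
            · exact absurd h hdead
            · exact Or.inl (hgrow h)
            · exact Or.inr (Or.inl h)
            · exact Or.inr (Or.inr h)
      · by_cases hD : p.toNat = c.toNat + 1
        · -- descending step: counters become (1, desc + 1)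
          have hsA : stepA p c = false := by simp [stepA, hA]
          have hsD : stepD p c = true := by simp [stepD, hL, hD]
          by_cases h4 : 4 ≤ desc + 1
          · have hlhs : pvAltLoop (some p) asc desc (c :: rs) = true := by
              simp [pvAltLoop, hL, hD, h4]
            simp only [hlhs, true_iff]
            exact Or.inr (Or.inl ⟨1, le_refl 1, by omega, by simp [cont, hsD]⟩)
          · have hlhs : pvAltLoop (some p) asc desc (c :: rs) = pvAltLoop (some c) 1 (desc + 1) rs := by
              simp [pvAltLoop, hL, hD, h4, show ¬ c.toNat = c.toNat + 1 + 1 by omega]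
            rw [hlhs, ih c 1 (desc + 1) (by omega) (by omega),
                ex_shift stepD p c rs desc hsD h4, ex_one stepA c rs]
            have hdead := ex_dead stepA p c rs asc hsA
            have hgrow := c3_to_ex stepD c rs (desc + 1) (by omega)
            constructor
            · rintro (h | h | h)
              · exact Or.inr (Or.inr (Or.inl (Or.inl h)))
              · exact Or.inr (Or.inl h)
              · exact Or.inr (Or.inr (Or.inr h))
            · rintro (h | h | (h | h) | h)
              · exact absurd h hdead
              · exact Or.inr (Or.inl h)
              · exact Or.inl h
              · exact Or.inr (Or.inl (hgrow h))
              · exact Or.inr (Or.inr h)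
        · -- both characters letters but no unit step: counters reset to (1, 1)
          have hsA : stepA p c = false := by simp [stepA, hA]
          have hsD : stepD p c = false := by simp [stepD, hD]
          have hlhs : pvAltLoop (some p) asc desc (c :: rs) = pvAltLoop (some c) 1 1 rs := by
            simp [pvAltLoop, hL, hA, hD]
          rw [hlhs, ih c 1 1 (le_refl 1) (le_refl 1), ex_one stepA c rs, ex_one stepD c rs]
          have hdA := ex_dead stepA p c rs asc hsA
          have hdD := ex_dead stepD p c rs desc hsD
          constructor
          · rintro (h | h | h)
            · exact Or.inr (Or.inr (Or.inl (Or.inl h)))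
            · exact Or.inr (Or.inr (Or.inl (Or.inr h)))
            · exact Or.inr (Or.inr (Or.inr h))
          · rintro (h | h | (h | h) | h)
            · exact absurd h hdA
            · exact absurd h hdD
            · exact Or.inl h
            · exact Or.inr (Or.inl h)
            · exact Or.inr (Or.inr h)
    · -- not both letters: counters reset to (1, 1)
      have hL' : (pvIsL p && pvIsL c) = false := by
        cases h : (pvIsL p && pvIsL c) <;> simp_all
      have hsA : stepA p c = false := by simp [stepA, hL']
      have hsD : stepD p c = false := by simp [stepD, hL']
      have hlhs : pvAltLoop (some p) asc desc (c :: rs) = pvAltLoop (some c) 1 1 rs := by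
        simp [pvAltLoop, hL']
      rw [hlhs, ih c 1 1 (le_refl 1) (le_refl 1), ex_one stepA c rs, ex_one stepD c rs]
      have hdA := ex_dead stepA p c rs asc hsA
      have hdD := ex_dead stepD p c rs desc hsD
      constructor
      · rintro (h | h | h)
        · exact Or.inr (Or.inr (Or.inl (Or.inl h)))
        · exact Or.inr (Or.inr (Or.inl (Or.inr h)))
        · exact Or.inr (Or.inr (Or.inr h))
      · rintro (h | h | (h | h) | h)
        · exact absurd h hdA
        · exact absurd h hdD
        · exact Or.inl h
        · exact Or.inr (Or.inl h)
        · exact Or.inr (Or.inr h)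

-- B-side characterisation
lemma B_iff (l : List Char) : pvAltLoop none 1 1 l = true ↔ RunP l := by
  cases l with
  | nil =>
    simp only [pvAltLoop, Bool.false_eq_true, false_iff]
    exact runP_nil
  | cons c rs =>
    have h1 : pvAltLoop none 1 1 (c :: rs) = pvAltLoop (some c) 1 1 rs := by
      simp [pvAltLoop]
    rw [h1, loop_iff rs c 1 1 (le_refl 1) (le_refl 1), ex_one stepA c rs, ex_one stepD c rs,
        runP_cons' c rs]
    tauto

-- ===== VERDICT (by name: the statement is the Claim_ definition above) =====
theorem letter_sequence_spec : Claim_equal_letter_sequence := by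
  intro t _
  unfold Spec_letter_sequence letter_sequence letter_sequence_alt
  rw [Bool.eq_iff_iff, A_iff, B_iff]
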